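-- pv_equiv track=rewrite | github.com/FabioLiberti/FL-EHDS-FLICS2026 | fl-ehds-framework/benchmarks/analyze_tabular_extended.py | organize_sweep_by_phase
-- ===== SOURCE A (Python) =====
-- def organize_sweep_by_phase(sweep):
--     """Organize sweep results by phase and variation."""
--     phases = {1: [], 2: [], 3: []}
--     for key, res in sweep.items():
--         if "error" in res:
--             continue
--         p = res.get("phase", 0)
--         if p in phases:
--             phases[p].append(res)
--     return phases
-- ===== SOURCE B (Python) =====
-- def organize_sweep_by_phase(sweep):
--     """Organize sweep results by phase and variation (per-bucket filtering)."""
--     return {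
--         p: [res for res in sweep.values()
--             if "error" not in res and res.get("phase", 0) == p]
--         for p in (1, 2, 3)
--     }
-- ===== Notes on version B (the rewrite author's own statement) =====
-- stated objective: alternative
-- what changed: Replaces the single dispatching loop that mutates a pre-built phase dict with a dict comprehension that builds each of the three buckets independently by filtering the sweep values for that phase.
import Mathlib
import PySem

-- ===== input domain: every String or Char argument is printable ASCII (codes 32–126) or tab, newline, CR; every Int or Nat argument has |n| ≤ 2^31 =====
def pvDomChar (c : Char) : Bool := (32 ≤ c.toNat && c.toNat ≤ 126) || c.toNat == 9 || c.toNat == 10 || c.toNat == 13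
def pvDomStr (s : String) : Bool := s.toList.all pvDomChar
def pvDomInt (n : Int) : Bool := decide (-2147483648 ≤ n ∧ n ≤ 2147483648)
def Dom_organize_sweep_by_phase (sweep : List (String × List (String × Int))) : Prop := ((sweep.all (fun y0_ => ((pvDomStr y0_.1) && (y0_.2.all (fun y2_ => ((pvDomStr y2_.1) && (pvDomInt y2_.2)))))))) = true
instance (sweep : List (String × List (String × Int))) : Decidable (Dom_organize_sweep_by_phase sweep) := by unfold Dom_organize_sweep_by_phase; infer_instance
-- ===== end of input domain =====

-- B builds each phase bucket independently by filtering the sweep values, instead of A's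
-- single dispatching loop appending into a pre-built {1,2,3} dict; same cost, different decomposition.

-- ===== PORT A =====
-- A: build phases = {1: [], 2: [], 3: []}, then one pass over sweep.items() appending
-- each non-error result to the bucket of its phase (if that phase is a key of phases).
-- pvStepA is the literal body of A's for-loop (the helper only names the loop body).
def pvStepA (phases : PySem.Dict Int (List (List (String × Int))))
    (kr : String × List (String × Int)) : PySem.Dict Int (List (List (String × Int))) :=
  let res := kr.2
  if (PySem.Dict.mk res).contains "error" then phases
  else
    let p := (PySem.Dict.mk res).getD "phase" 0
    if phases.contains p then phases.modify p [] (fun l => l ++ [res]) else phases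

def organize_sweep_by_phase (sweep : List (String × List (String × Int))) : List (Int × List (List (String × Int))) :=
  (sweep.foldl pvStepA (PySem.Dict.ofList [(1, []), (2, []), (3, [])])).items

-- ===== PORT B =====
-- B: a dict comprehension {p: [res for res in sweep.values() if "error" not in res
-- and res.get("phase", 0) == p] for p in (1, 2, 3)} — three independent filtering passes.
def organize_sweep_by_phase_alt (sweep : List (String × List (String × Int))) : List (Int × List (List (String × Int))) :=
  [(1 : Int), 2, 3].map (fun p =>
    (p, (sweep.map (·.2)).filter (fun res =>
          !(PySem.Dict.mk res).contains "error" && (PySem.Dict.mk res).getD "phase" 0 == p)))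

-- ===== PRECONDITION & SPEC =====
def Spec_organize_sweep_by_phase (sweep : List (String × List (String × Int))) (out : List (Int × List (List (String × Int)))) : Prop := out = organize_sweep_by_phase_alt sweep
instance (sweep : List (String × List (String × Int))) (out : List (Int × List (List (String × Int)))) : Decidable (Spec_organize_sweep_by_phase sweep out) := by unfold Spec_organize_sweep_by_phase; infer_instance

-- ===== CLAIM (what is proved, stated in full; the proofs are below) =====
def Claim_equal_organize_sweep_by_phase : Prop := ∀ (sweep : List (String × List (String × Int))), Dom_organize_sweep_by_phase sweep → Spec_organize_sweep_by_phase sweep (organize_sweep_by_phase sweep)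

-- ===== LEMMAS AND PROOFS =====

-- the per-result filter predicate of B
def pvSel (p : Int) (res : List (String × Int)) : Bool :=
  !(PySem.Dict.mk res).contains "error" && (PySem.Dict.mk res).getD "phase" 0 == p

-- A's loop, started on a literal {1,2,3}-keyed dict, ends with each bucket extended by
-- exactly the results B's filter for that phase selects (in order).
theorem pvLoop (l : List (String × List (String × Int)))
    (a b c : List (List (String × Int))) :
    l.foldl pvStepA (PySem.Dict.mk [(1, a), (2, b), (3, c)])
    = PySem.Dict.mk [(1, a ++ (l.map (·.2)).filter (pvSel 1)),
                     (2, b ++ (l.map (·.2)).filter (pvSel 2)),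
                     (3, c ++ (l.map (·.2)).filter (pvSel 3))] := by
  induction l generalizing a b c with
  | nil => simp
  | cons kr l ih =>
    obtain ⟨k, res⟩ := kr
    rw [List.foldl_cons]
    by_cases herr : (PySem.Dict.mk res).contains "error"
    · have hstep : pvStepA (PySem.Dict.mk [(1, a), (2, b), (3, c)]) (k, res)
          = PySem.Dict.mk [(1, a), (2, b), (3, c)] := by
        simp [pvStepA, herr]
      rw [hstep, ih]
      simp [pvSel, herr]
    · simp only [PySem.Dict.contains] at herr
      by_cases h1 : (PySem.Dict.mk res).getD "phase" 0 = 1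
      · have hstep : pvStepA (PySem.Dict.mk [(1, a), (2, b), (3, c)]) (k, res)
            = PySem.Dict.mk [(1, a ++ [res]), (2, b), (3, c)] := by
          simp only [pvStepA, h1]
          simp [herr, PySem.Dict.contains, PySem.Dict.modify,
            PySem.Dict.insert, PySem.Dict.getD, PySem.Dict.get?]
        rw [hstep, ih]
        simp [pvSel, herr, h1]
      · by_cases h2 : (PySem.Dict.mk res).getD "phase" 0 = 2
        · have hstep : pvStepA (PySem.Dict.mk [(1, a), (2, b), (3, c)]) (k, res)
              = PySem.Dict.mk [(1, a), (2, b ++ [res]), (3, c)] := by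
            simp only [pvStepA, h2]
            simp [herr, PySem.Dict.contains, PySem.Dict.modify,
              PySem.Dict.insert, PySem.Dict.getD, PySem.Dict.get?]
          rw [hstep, ih]
          simp [pvSel, herr, h2]
        · by_cases h3 : (PySem.Dict.mk res).getD "phase" 0 = 3
          · have hstep : pvStepA (PySem.Dict.mk [(1, a), (2, b), (3, c)]) (k, res)
                = PySem.Dict.mk [(1, a), (2, b), (3, c ++ [res])] := by
              simp only [pvStepA, h3]
              simp [herr, PySem.Dict.contains, PySem.Dict.modify,
                PySem.Dict.insert, PySem.Dict.getD, PySem.Dict.get?]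
            rw [hstep, ih]
            simp [pvSel, herr, h3]
          · have hstep : pvStepA (PySem.Dict.mk [(1, a), (2, b), (3, c)]) (k, res)
                = PySem.Dict.mk [(1, a), (2, b), (3, c)] := by
              have h1' : ¬ ((1:Int) = (PySem.Dict.mk res).getD "phase" 0) := fun h => h1 h.symm
              have h2' : ¬ ((2:Int) = (PySem.Dict.mk res).getD "phase" 0) := fun h => h2 h.symm
              have h3' : ¬ ((3:Int) = (PySem.Dict.mk res).getD "phase" 0) := fun h => h3 h.symm
              simp [pvStepA, herr, h1', h2', h3', PySem.Dict.contains]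
            rw [hstep, ih]
            simp [pvSel, herr, h1, h2, h3]

-- ===== VERDICT (by name: the statement is the Claim_ definition above) =====
theorem organize_sweep_by_phase_spec : Claim_equal_organize_sweep_by_phase := by
  intro sweep _
  show (sweep.foldl pvStepA
      (PySem.Dict.mk [(1, ([] : List (List (String × Int)))), (2, []), (3, [])])).items
    = organize_sweep_by_phase_alt sweep
  rw [pvLoop]
  have hsel : ∀ p : Int, pvSel p = fun res =>
      !(PySem.Dict.mk res).contains "error" && (PySem.Dict.mk res).getD "phase" 0 == p :=
    fun p => funext (fun res => rfl)
  simp [organize_sweep_by_phase_alt, hsel]
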